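-- pv_equiv track=rewrite | github.com/Abhimanyu-dev/ICG | prediction (2).py | calc_8_sums
-- ===== SOURCE A (Python) =====
-- grid_loc_to_sum_indexes = {
--     (0, 0): [0, 3, 7],
--     (0, 1): [0, 4],
--     (0, 2): [0, 5, 6],
--     (1, 0): [1, 3],
--     (1, 1): [1, 4, 6, 7],
--     (1, 2): [1, 5],
--     (2, 0): [2, 3, 6],
--     (2, 1): [2, 4],
--     (2, 2): [2, 5, 7]
-- }
--
-- def calc_8_sums(grid):
--     grid_sums = [0, 0, 0, 0, 0, 0, 0, 0, 0]
--
--     for i in range(3):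
--         for j in range(3):
--
--             grid_sums[8] += grid[i][j]
--             for x in grid_loc_to_sum_indexes[(i, j)]:
--                 grid_sums[x] += grid[i][j]
--
--     return grid_sums
-- ===== SOURCE B (Python) =====
-- def calc_8_sums(grid):
--     r0, r1, r2 = grid[0], grid[1], grid[2]
--     row0 = r0[0] + r0[1] + r0[2]
--     row1 = r1[0] + r1[1] + r1[2]
--     row2 = r2[0] + r2[1] + r2[2]
--     return [
--         row0,
--         row1,
--         row2,
--         r0[0] + r1[0] + r2[0],
--         r0[1] + r1[1] + r2[1],
--         r0[2] + r1[2] + r2[2],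
--         r0[2] + r1[1] + r2[0],
--         r0[0] + r1[1] + r2[2],
--         row0 + row1 + row2,
--     ]
-- ===== Notes on version B (the rewrite author's own statement) =====
-- stated objective: simpler
-- what changed: Replaces the per-cell scatter loop driven by a (row,col)->sum-indexes lookup table with nine direct closed-form sums (rows, columns, diagonals, grand total), dropping the table and the mutable accumulator entirely.
import Mathlib
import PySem

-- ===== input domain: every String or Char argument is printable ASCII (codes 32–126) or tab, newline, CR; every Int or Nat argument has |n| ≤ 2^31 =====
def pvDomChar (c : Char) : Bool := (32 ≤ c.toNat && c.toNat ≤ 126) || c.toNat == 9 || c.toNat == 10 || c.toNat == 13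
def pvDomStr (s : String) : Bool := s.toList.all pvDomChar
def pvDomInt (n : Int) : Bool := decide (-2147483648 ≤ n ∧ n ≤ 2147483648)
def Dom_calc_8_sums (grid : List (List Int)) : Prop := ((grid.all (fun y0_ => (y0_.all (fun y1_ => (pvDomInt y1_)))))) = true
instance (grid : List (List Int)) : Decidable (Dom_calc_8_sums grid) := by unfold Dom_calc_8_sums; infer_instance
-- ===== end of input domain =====

-- B replaces A's table-driven per-cell scatter loop with nine direct closed-form sums (simpler; same cost).

-- ===== PORT A =====
-- the module-level lookup table, as a PySem.Dict built in source order
def grid_loc_to_sum_indexes : PySem.Dict (Int × Int) (List Int) :=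
  ((((((((PySem.Dict.empty.insert (0, 0) [0, 3, 7]).insert (0, 1) [0, 4]).insert
    (0, 2) [0, 5, 6]).insert (1, 0) [1, 3]).insert (1, 1) [1, 4, 6, 7]).insert
    (1, 2) [1, 5]).insert (2, 0) [2, 3, 6]).insert (2, 1) [2, 4]).insert (2, 2) [2, 5, 7]

-- grid[i][j]; default never used under Pre_
def cellA (grid : List (List Int)) (i j : Int) : Int :=
  PySem.List.pyGetD (PySem.List.pyGetD grid i []) j 0

-- grid_sums[x] += v
def bump (sums : List Int) (x : Int) (v : Int) : List Int :=
  PySem.List.pySetD sums x (PySem.List.pyGetD sums x 0 + v)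

def calc_8_sums (grid : List (List Int)) : List Int :=
  (PySem.List.pyRange 0 3 1).foldl (fun sums i =>
    (PySem.List.pyRange 0 3 1).foldl (fun sums j =>
      let v := cellA grid i j
      let sums := bump sums 8 v
      (grid_loc_to_sum_indexes.getD (i, j) []).foldl (fun sums x => bump sums x v) sums)
      sums)
    [0, 0, 0, 0, 0, 0, 0, 0, 0]

-- ===== PORT B =====
def calc_8_sums_alt (grid : List (List Int)) : List Int :=
  let r0 := PySem.List.pyGetD grid 0 []
  let r1 := PySem.List.pyGetD grid 1 []
  let r2 := PySem.List.pyGetD grid 2 []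
  let row0 := PySem.List.pyGetD r0 0 0 + PySem.List.pyGetD r0 1 0 + PySem.List.pyGetD r0 2 0
  let row1 := PySem.List.pyGetD r1 0 0 + PySem.List.pyGetD r1 1 0 + PySem.List.pyGetD r1 2 0
  let row2 := PySem.List.pyGetD r2 0 0 + PySem.List.pyGetD r2 1 0 + PySem.List.pyGetD r2 2 0
  [ row0, row1, row2,
    PySem.List.pyGetD r0 0 0 + PySem.List.pyGetD r1 0 0 + PySem.List.pyGetD r2 0 0,
    PySem.List.pyGetD r0 1 0 + PySem.List.pyGetD r1 1 0 + PySem.List.pyGetD r2 1 0,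
    PySem.List.pyGetD r0 2 0 + PySem.List.pyGetD r1 2 0 + PySem.List.pyGetD r2 2 0,
    PySem.List.pyGetD r0 2 0 + PySem.List.pyGetD r1 1 0 + PySem.List.pyGetD r2 0 0,
    PySem.List.pyGetD r0 0 0 + PySem.List.pyGetD r1 1 0 + PySem.List.pyGetD r2 2 0,
    row0 + row1 + row2 ]

-- ===== PRECONDITION & SPEC =====
-- A raises IndexError unless the grid has at least 3 rows whose first three rows each have at least 3 entries
def Pre_calc_8_sums (grid : List (List Int)) : Prop :=
  3 ≤ grid.length ∧ ∀ row ∈ grid.take 3, 3 ≤ row.length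
instance (grid : List (List Int)) : Decidable (Pre_calc_8_sums grid) := by
  unfold Pre_calc_8_sums; infer_instance

def pvWitness_calc_8_sums : List (List Int) := [[1, 2, 3], [4, 5, 6], [7, 8, 9]]

def Spec_calc_8_sums (grid : List (List Int)) (out : List Int) : Prop := out = calc_8_sums_alt grid
instance (grid : List (List Int)) (out : List Int) : Decidable (Spec_calc_8_sums grid out) := by unfold Spec_calc_8_sums; infer_instance

-- ===== CLAIM (what is proved, stated in full; the proofs are below) =====
def Claim_equal_calc_8_sums : Prop := ∀ (grid : List (List Int)), Dom_calc_8_sums grid → Pre_calc_8_sums grid → Spec_calc_8_sums grid (calc_8_sums grid)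

-- ===== LEMMAS AND PROOFS =====
theorem main_eval (a b c d e f g h i : Int) (t0 t1 t2 : List Int) (rest : List (List Int)) :
    calc_8_sums ((a :: b :: c :: t0) :: (d :: e :: f :: t1) :: (g :: h :: i :: t2) :: rest)
      = calc_8_sums_alt ((a :: b :: c :: t0) :: (d :: e :: f :: t1) :: (g :: h :: i :: t2) :: rest) := by
  simp [calc_8_sums, calc_8_sums_alt, cellA, bump, grid_loc_to_sum_indexes,
    PySem.List.pyRange_one, List.range_succ, PySem.List.pyGetD,
    PySem.List.pyGet?_of_nonneg, PySem.List.pySetD_of_nonneg,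
    PySem.Dict.getD, PySem.Dict.get?, PySem.Dict.insert, PySem.Dict.empty]
  ring_nf

-- ===== VERDICT (by name: the statement is the Claim_ definition above) =====
theorem calc_8_sums_spec : Claim_equal_calc_8_sums := by
  intro grid _ hpre
  obtain ⟨hlen, hrows⟩ := hpre
  match grid, hlen with
  | r0 :: r1 :: r2 :: rest, _ =>
    have h0 := hrows r0 (by simp)
    have h1 := hrows r1 (by simp)
    have h2 := hrows r2 (by simp)
    match r0, h0 with
    | a :: b :: c :: t0, _ =>
    match r1, h1 with
    | d :: e :: f :: t1, _ =>
    match r2, h2 with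
    | g :: h :: i :: t2, _ =>
      exact main_eval a b c d e f g h i t0 t1 t2 rest
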